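-- pv_equiv track=rewrite | github.com/FlamurL/AI-Artificial-Intelligence | practice-exercises/first midterm/first_midterm_example_1/problem1.py | checkCnt
-- ===== SOURCE A (Python) =====
-- def checkCnt(state):
--     new_man, box, n,newbox = state
--     new_box=[]
--
--     for b in newbox:
--         if b != (new_man[0], new_man[1] + 1) and b != (new_man[0] + 1, new_man[1]) and b != (new_man[0] - 1, new_man[1]) and b != (new_man[0], new_man[1] - 1) and b != (new_man[0] + 1, new_man[1] + 1) and b != (new_man[0] - 1, new_man[1] - 1) and b != (new_man[0] + 1, new_man[1] - 1) and b != (new_man[0] - 1, new_man[1] + 1):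
--             new_box.append(b)
--
--     new_box=tuple(new_box)
--     return (new_man,box,n,new_box)
-- ===== SOURCE B (Python) =====
-- def checkCnt(state):
--     new_man, box, n, newbox = state
--     x, y = new_man
--     kept = list(newbox)
--     for d in ((x, y + 1), (x + 1, y), (x - 1, y), (x, y - 1),
--               (x + 1, y + 1), (x - 1, y - 1), (x + 1, y - 1), (x - 1, y + 1)):
--         kept = [b for b in kept if b != d]
--     return (new_man, box, n, tuple(kept))
-- ===== Notes on version B (the rewrite author's own statement) =====
-- stated objective: alternative
-- what changed: Inverts the loop structure: instead of one pass over the boxes testing each against the eight neighbor cells, B iterates over the eight neighbor cells and successively deletes all occurrences of each cell from the box list in staged passes (correct because the eight cells are pairwise distinct and deletion preserves relative order).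
import Mathlib
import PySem

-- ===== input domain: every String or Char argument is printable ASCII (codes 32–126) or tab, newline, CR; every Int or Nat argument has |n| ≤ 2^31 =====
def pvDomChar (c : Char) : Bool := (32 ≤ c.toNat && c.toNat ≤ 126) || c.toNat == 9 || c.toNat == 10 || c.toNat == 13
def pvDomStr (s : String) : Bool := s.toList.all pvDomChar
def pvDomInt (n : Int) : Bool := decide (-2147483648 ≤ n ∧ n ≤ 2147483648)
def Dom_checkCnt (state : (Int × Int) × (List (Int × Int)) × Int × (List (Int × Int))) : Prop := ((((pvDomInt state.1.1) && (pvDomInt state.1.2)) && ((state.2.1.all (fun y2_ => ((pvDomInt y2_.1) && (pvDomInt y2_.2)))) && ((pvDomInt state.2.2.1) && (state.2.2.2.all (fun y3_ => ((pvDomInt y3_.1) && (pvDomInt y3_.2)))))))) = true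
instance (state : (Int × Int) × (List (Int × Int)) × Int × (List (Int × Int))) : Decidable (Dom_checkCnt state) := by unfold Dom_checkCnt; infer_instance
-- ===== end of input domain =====

-- B inverts the loop structure: it iterates over the eight neighbor cells of the man and deletes
-- each cell's occurrences from the box list in staged passes, instead of A's single pass over the
-- boxes testing each against all eight cells (alternative decomposition, same cost).
-- ===== PORT A =====
def checkCnt (state : (Int × Int) × (List (Int × Int)) × Int × (List (Int × Int))) : (Int × Int) × (List (Int × Int)) × Int × (List (Int × Int)) :=
  let new_man := state.1
  let box := state.2.1
  let n := state.2.2.1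
  let newbox := state.2.2.2
  let new_box := newbox.foldl (fun acc b =>
    if b ≠ (new_man.1, new_man.2 + 1) ∧ b ≠ (new_man.1 + 1, new_man.2) ∧
       b ≠ (new_man.1 - 1, new_man.2) ∧ b ≠ (new_man.1, new_man.2 - 1) ∧
       b ≠ (new_man.1 + 1, new_man.2 + 1) ∧ b ≠ (new_man.1 - 1, new_man.2 - 1) ∧
       b ≠ (new_man.1 + 1, new_man.2 - 1) ∧ b ≠ (new_man.1 - 1, new_man.2 + 1)
    then acc ++ [b] else acc) []
  (new_man, box, n, new_box)

-- ===== PORT B =====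
def checkCnt_alt (state : (Int × Int) × (List (Int × Int)) × Int × (List (Int × Int))) : (Int × Int) × (List (Int × Int)) × Int × (List (Int × Int)) :=
  let new_man := state.1
  let x := new_man.1
  let y := new_man.2
  let kept := [(x, y + 1), (x + 1, y), (x - 1, y), (x, y - 1),
               (x + 1, y + 1), (x - 1, y - 1), (x + 1, y - 1), (x - 1, y + 1)].foldl
    (fun kept d => kept.filter (fun b => b != d)) state.2.2.2
  (new_man, state.2.1, state.2.2.1, kept)

-- ===== PRECONDITION & SPEC =====
def Spec_checkCnt (state : (Int × Int) × (List (Int × Int)) × Int × (List (Int × Int))) (out : (Int × Int) × (List (Int × Int)) × Int × (List (Int × Int))) : Prop := out = checkCnt_alt state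
instance (state : (Int × Int) × (List (Int × Int)) × Int × (List (Int × Int))) (out : (Int × Int) × (List (Int × Int)) × Int × (List (Int × Int))) : Decidable (Spec_checkCnt state out) := by unfold Spec_checkCnt; infer_instance

-- ===== CLAIM (what is proved, stated in full; the proofs are below) =====
def Claim_equal_checkCnt : Prop := ∀ (state : (Int × Int) × (List (Int × Int)) × Int × (List (Int × Int))), Dom_checkCnt state → Spec_checkCnt state (checkCnt state)

-- ===== LEMMAS AND PROOFS =====
-- Staged deletion passes are one filter by "not in the list of deleted cells".
theorem pv_fold_filter (ds : List (Int × Int)) (xs : List (Int × Int)) :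
    ds.foldl (fun kept d => kept.filter (fun b => b != d)) xs
    = xs.filter (fun b => ds.all (fun d => b != d)) := by
  induction ds generalizing xs with
  | nil => simp
  | cons d ds ih =>
    rw [List.foldl_cons, ih, List.filter_filter]
    exact List.filter_congr (fun b _ => by simp [List.all_cons, Bool.and_comm])

-- A's eight-way inequality is membership-failure in the eight-neighbor list, pointwise.
theorem pv_pred_eq (m b : Int × Int) :
    (decide (b ≠ (m.1, m.2 + 1) ∧ b ≠ (m.1 + 1, m.2) ∧
       b ≠ (m.1 - 1, m.2) ∧ b ≠ (m.1, m.2 - 1) ∧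
       b ≠ (m.1 + 1, m.2 + 1) ∧ b ≠ (m.1 - 1, m.2 - 1) ∧
       b ≠ (m.1 + 1, m.2 - 1) ∧ b ≠ (m.1 - 1, m.2 + 1)))
    = ([(m.1, m.2 + 1), (m.1 + 1, m.2), (m.1 - 1, m.2), (m.1, m.2 - 1),
        (m.1 + 1, m.2 + 1), (m.1 - 1, m.2 - 1), (m.1 + 1, m.2 - 1), (m.1 - 1, m.2 + 1)].all
        (fun d => b != d)) := by
  rw [Bool.eq_iff_iff]
  simp [List.all_cons, bne]

-- ===== VERDICT (by name: the statement is the Claim_ definition above) =====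
theorem checkCnt_spec : Claim_equal_checkCnt := by
  intro state _
  unfold Spec_checkCnt checkCnt checkCnt_alt
  simp only []
  rw [PySem.List.foldl_append_ite_eq_filter, List.nil_append, pv_fold_filter,
      List.filter_congr (fun b _ => pv_pred_eq state.1 b)]
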